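-- pv_equiv track=rewrite | github.com/TejaswiniSruthi/CodeMind | AllVowelsInString.py | vow
-- ===== SOURCE A (Python) =====
-- def vow(s):
--     v=['a','e','i','o','u']
--     V=['A','E','I','O','U']
--     for i in s:
--         if i in v:
--             v.remove(i)
--         if i in V:
--             V.remove(i)
--         if len(v)==0 or len(V)==0:
--             return True
--     return False
-- ===== SOURCE B (Python) =====
-- def vow(s):
--     letters = set(s)
--     return set('aeiou') <= letters or set('AEIOU') <= letters
-- ===== Notes on version B (the rewrite author's own statement) =====
-- stated objective: simpler
-- what changed: Replaces the per-character scan with mutating vowel lists and early return by one set construction over the string plus two fixed subset tests.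
import Mathlib
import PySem

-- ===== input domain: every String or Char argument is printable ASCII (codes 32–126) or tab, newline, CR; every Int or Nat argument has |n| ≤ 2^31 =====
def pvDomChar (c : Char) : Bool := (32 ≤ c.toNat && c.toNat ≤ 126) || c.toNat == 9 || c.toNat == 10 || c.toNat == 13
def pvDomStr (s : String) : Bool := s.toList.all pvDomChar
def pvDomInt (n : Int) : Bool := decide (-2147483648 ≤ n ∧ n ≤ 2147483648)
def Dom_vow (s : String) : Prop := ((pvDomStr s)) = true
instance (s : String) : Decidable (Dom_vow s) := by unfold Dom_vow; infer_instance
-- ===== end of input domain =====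

-- B replaces A's per-character scan with mutating vowel lists and early return by one
-- set of the string's characters plus two fixed subset tests (objective: simpler).

-- ===== PORT A =====
-- the for-loop of A, carrying the two shrinking vowel lists v and V
def vowLoop : List Char → List Char → List Char → Bool
  | [], _, _ => false
  | i :: rest, v, V =>
    let v' := if v.contains i then (PySem.List.remove? v i).getD v else v
    let V' := if V.contains i then (PySem.List.remove? V i).getD V else V
    if v'.length = 0 ∨ V'.length = 0 then true else vowLoop rest v' V'

def vow (s : String) : Bool :=
  vowLoop s.toList ['a','e','i','o','u'] ['A','E','I','O','U']

-- ===== PORT B =====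
def vow_alt (s : String) : Bool :=
  let letters : PySem.Set Char := PySem.Set.ofList s.toList
  PySem.Set.issubset (PySem.Set.ofList ['a','e','i','o','u']) letters
    || PySem.Set.issubset (PySem.Set.ofList ['A','E','I','O','U']) letters

-- ===== PRECONDITION & SPEC =====
def Spec_vow (s : String) (out : Bool) : Prop := out = vow_alt s
instance (s : String) (out : Bool) : Decidable (Spec_vow s out) := by unfold Spec_vow; infer_instance

-- ===== CLAIM (what is proved, stated in full; the proofs are below) =====
def Claim_equal_vow : Prop := ∀ (s : String), Dom_vow s → Spec_vow s (vow s)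

-- ===== LEMMAS AND PROOFS =====

lemma erase_step (v : List Char) (i : Char) :
    (if v.contains i then (PySem.List.remove? v i).getD v else v) = v.erase i := by
  by_cases h : i ∈ v
  · rw [if_pos (by simpa using h), PySem.List.remove?_eq_some_erase v i h, Option.getD_some]
  · simp [h, List.erase_of_not_mem h]

lemma sub_erase (v rest : List Char) (i : Char) (hnd : v.Nodup) :
    (∀ x ∈ v.erase i, x ∈ rest) ↔ (∀ x ∈ v, x ∈ i :: rest) := by
  constructor
  · intro h x hx
    by_cases hxi : x = i
    · simp [hxi]
    · have : x ∈ v.erase i := (List.Nodup.mem_erase_iff hnd).mpr ⟨hxi, hx⟩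
      simp [h x this]
  · intro h x hx
    have hx' := (List.Nodup.mem_erase_iff hnd).mp hx
    have := h x hx'.2
    simp [hx'.1] at this
    exact this

lemma vowLoop_true_iff : ∀ (cs v V : List Char), v ≠ [] → V ≠ [] → v.Nodup → V.Nodup →
    (vowLoop cs v V = true ↔ (∀ x ∈ v, x ∈ cs) ∨ (∀ x ∈ V, x ∈ cs)) := by
  intro cs
  induction cs with
  | nil =>
    intro v V hv hV _ _
    obtain ⟨a, v, rfl⟩ := List.exists_cons_of_ne_nil hv
    obtain ⟨b, V, rfl⟩ := List.exists_cons_of_ne_nil hV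
    simp only [vowLoop, Bool.false_eq_true, false_iff]
    push Not
    exact ⟨⟨a, by simp, by simp⟩, ⟨b, by simp, by simp⟩⟩
  | cons i rest ih =>
    intro v V hv hV hvnd hVnd
    rw [show vowLoop (i :: rest) v V =
        (if (v.erase i).length = 0 ∨ (V.erase i).length = 0 then true
         else vowLoop rest (v.erase i) (V.erase i)) by
      simp only [vowLoop, erase_step]]
    by_cases hz : (v.erase i).length = 0 ∨ (V.erase i).length = 0
    · rw [if_pos hz]
      simp only [true_iff]
      rcases hz with hz | hz
      · left
        intro x hx
        by_cases hxi : x = i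
        · simp [hxi]
        · exact absurd ((List.Nodup.mem_erase_iff hvnd).mpr ⟨hxi, hx⟩)
            (by simp [List.length_eq_zero_iff.mp hz])
      · right
        intro x hx
        by_cases hxi : x = i
        · simp [hxi]
        · exact absurd ((List.Nodup.mem_erase_iff hVnd).mpr ⟨hxi, hx⟩)
            (by simp [List.length_eq_zero_iff.mp hz])
    · push Not at hz
      rw [if_neg (by omega)]
      rw [ih (v.erase i) (V.erase i)
            (by intro h; exact absurd (by simp [h]) (by omega : ¬ (v.erase i).length = 0))
            (by intro h; exact absurd (by simp [h]) (by omega : ¬ (V.erase i).length = 0))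
            (hvnd.erase i) (hVnd.erase i)]
      rw [sub_erase v rest i hvnd, sub_erase V rest i hVnd]

lemma vow_alt_true_iff (s : String) :
    vow_alt s = true ↔
      ((∀ x ∈ (['a','e','i','o','u'] : List Char), x ∈ s.toList) ∨
       (∀ x ∈ (['A','E','I','O','U'] : List Char), x ∈ s.toList)) := by
  simp [vow_alt, PySem.Set.issubset_iff, PySem.Set.mem_ofList]

-- ===== VERDICT (by name: the statement is the Claim_ definition above) =====
theorem vow_spec : Claim_equal_vow := by
  intro s _
  unfold Spec_vow
  rw [Bool.eq_iff_iff]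
  rw [show vow s = vowLoop s.toList ['a','e','i','o','u'] ['A','E','I','O','U'] from rfl]
  rw [vowLoop_true_iff s.toList _ _ (by decide) (by decide) (by decide) (by decide)]
  rw [vow_alt_true_iff]
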